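-- pv_equiv track=rewrite | github.com/coralynnkc/cs329-group | presuppositions-all/prompt_benchmarking/scripts/batch_scorer_evaluation.py | dedup_predictions
-- ===== SOURCE A (Python) =====
-- from typing import Dict, List, Optional, Tuple
--
-- def dedup_predictions(pred_rows: List[Dict[str, str]]) -> Tuple[List[Dict[str, str]], int]:
--     seen = set()
--     deduped = []
--     duplicate_count = 0
--
--     for row in pred_rows:
--         item_id = str(row.get("item_id", "")).strip()
--         if item_id in seen:
--             duplicate_count += 1
--             continue
--         seen.add(item_id)
--         deduped.append(row)
--
--     return deduped, duplicate_count
-- ===== SOURCE B (Python) =====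
-- def dedup_predictions(pred_rows):
--     def key(row):
--         return str(row.get("item_id", "")).strip()
--     deduped = [row for i, row in enumerate(pred_rows)
--                if all(key(prev) != key(row) for prev in pred_rows[:i])]
--     return deduped, len(pred_rows) - len(deduped)
-- ===== Notes on version B (the rewrite author's own statement) =====
-- stated objective: alternative
-- what changed: Replaces A's stateful single pass (seen-set + appended list + incremented counter) by a stateless look-back filter: a row is kept iff no earlier row of pred_rows has the same stripped item_id, and the duplicate count is derived by subtraction; this trades O(n) with a hash set for an O(n^2) comparison-based scan with no auxiliary state.
import Mathlib
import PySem

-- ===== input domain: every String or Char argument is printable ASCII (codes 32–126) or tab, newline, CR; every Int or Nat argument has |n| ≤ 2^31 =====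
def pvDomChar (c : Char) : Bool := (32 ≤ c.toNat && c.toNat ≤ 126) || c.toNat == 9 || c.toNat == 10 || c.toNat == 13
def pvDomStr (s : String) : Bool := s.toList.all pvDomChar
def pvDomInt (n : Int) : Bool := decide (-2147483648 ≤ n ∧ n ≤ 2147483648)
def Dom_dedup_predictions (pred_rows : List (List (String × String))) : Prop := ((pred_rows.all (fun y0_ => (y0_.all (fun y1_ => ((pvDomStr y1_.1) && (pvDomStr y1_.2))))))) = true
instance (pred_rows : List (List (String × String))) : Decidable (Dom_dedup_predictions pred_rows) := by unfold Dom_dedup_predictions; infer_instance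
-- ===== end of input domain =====

-- B replaces A's stateful seen-set/list/counter pass by a stateless look-back filter
-- (keep a row iff no earlier row has the same stripped key; count by subtraction).

-- ===== PORT A =====
def dedup_predictions (pred_rows : List (List (String × String))) : (List (List (String × String))) × Int :=
  let st := pred_rows.foldl
    (fun (st : PySem.Set String × List (List (String × String)) × Int) row =>
      let item_id := PySem.Str.strip ((PySem.Dict.mk row).getD "item_id" "")
      if PySem.Set.contains st.1 item_id then
        (st.1, st.2.1, st.2.2 + 1)
      else
        (PySem.Set.add st.1 item_id, st.2.1 ++ [row], st.2.2))
    (PySem.Set.empty, [], 0)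
  (st.2.1, st.2.2)

-- ===== PORT B =====
-- Source B's local helper `key`
def pvKeyB (row : List (String × String)) : String :=
  PySem.Str.strip ((PySem.Dict.mk row).getD "item_id" "")

def dedup_predictions_alt (pred_rows : List (List (String × String))) : (List (List (String × String))) × Int :=
  let deduped := ((PySem.List.enumerate pred_rows 0).filter
      (fun q => (PySem.List.slice pred_rows none (some q.1)).all
          (fun prev => pvKeyB prev != pvKeyB q.2))).map (fun q => q.2)
  (deduped, (pred_rows.length : Int) - (deduped.length : Int))

-- ===== PRECONDITION & SPEC =====
def Spec_dedup_predictions (pred_rows : List (List (String × String))) (out : (List (List (String × String))) × Int) : Prop := out = dedup_predictions_alt pred_rows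
instance (pred_rows : List (List (String × String))) (out : (List (List (String × String))) × Int) : Decidable (Spec_dedup_predictions pred_rows out) := by unfold Spec_dedup_predictions; infer_instance

-- ===== CLAIM (what is proved, stated in full; the proofs are below) =====
def Claim_equal_dedup_predictions : Prop := ∀ (pred_rows : List (List (String × String))), Dom_dedup_predictions pred_rows → Spec_dedup_predictions pred_rows (dedup_predictions pred_rows)

-- ===== LEMMAS AND PROOFS =====

-- canonical "first occurrences" list, threaded by a seen-set (proof-only helper)
def pvFirsts (seen : PySem.Set String) : List (List (String × String)) → List (List (String × String))
  | [] => []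
  | r :: rs =>
    if PySem.Set.contains seen (pvKeyB r) then pvFirsts seen rs
    else r :: pvFirsts (PySem.Set.add seen (pvKeyB r)) rs

-- A's fold computes (kept-so-far ++ pvFirsts seen rows, count + #dropped)
theorem pvA_fold (rows : List (List (String × String)))
    (seen : PySem.Set String) (acc : List (List (String × String))) (c : Int) :
    (rows.foldl
      (fun (st : PySem.Set String × List (List (String × String)) × Int) row =>
        let item_id := PySem.Str.strip ((PySem.Dict.mk row).getD "item_id" "")
        if PySem.Set.contains st.1 item_id then
          (st.1, st.2.1, st.2.2 + 1)
        else
          (PySem.Set.add st.1 item_id, st.2.1 ++ [row], st.2.2))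
      (seen, acc, c)).2
    = (acc ++ pvFirsts seen rows,
       c + (rows.length : Int) - ((pvFirsts seen rows).length : Int)) := by
  induction rows generalizing seen acc c with
  | nil => simp [pvFirsts]
  | cons r rs ih =>
    simp only [List.foldl_cons, pvFirsts]
    by_cases h : PySem.Set.contains seen (pvKeyB r) = true
    · rw [show PySem.Str.strip ((PySem.Dict.mk r).getD "item_id" "") = pvKeyB r from rfl]
      simp only [h, if_true]
      rw [ih]
      simp only [Prod.mk.injEq, true_and, List.length_cons]
      push_cast; omega
    · rw [show PySem.Str.strip ((PySem.Dict.mk r).getD "item_id" "") = pvKeyB r from rfl]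
      simp only [h, if_false, Bool.false_eq_true]
      rw [ih]
      simp only [Prod.mk.injEq, List.length_cons, List.append_assoc, List.singleton_append,
        true_and]
      push_cast; omega

-- B's look-back filter over the tail `rest` of full = p ++ rest equals pvFirsts seen rest,
-- whenever seen has exactly the keys of the prefix p
theorem pvB_filter (rest p : List (List (String × String))) (seen : PySem.Set String)
    (hinv : ∀ k, k ∈ seen ↔ k ∈ p.map pvKeyB) :
    ((PySem.List.enumerate rest (p.length : Int)).filter
      (fun q => (PySem.List.slice (p ++ rest) none (some q.1)).all
          (fun prev => pvKeyB prev != pvKeyB q.2))).map (fun q => q.2)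
    = pvFirsts seen rest := by
  induction rest generalizing p seen with
  | nil => simp [pvFirsts]
  | cons r rs ih =>
    rw [PySem.List.enumerate_cons]
    simp only [List.filter_cons]
    have hcond : ((PySem.List.slice (p ++ r :: rs) none (some ((p.length : Int))) ).all
        (fun prev => pvKeyB prev != pvKeyB r))
        = !(PySem.Set.contains seen (pvKeyB r)) := by
      rw [show PySem.List.slice (p ++ r :: rs) none (some (p.length : Int)) = p by
        rw [PySem.List.slice_to_natCast]; simp]
      by_cases hm : pvKeyB r ∈ p.map pvKeyB
      · have hc : PySem.Set.contains seen (pvKeyB r) = true :=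
          (PySem.Set.contains_iff _ _).mpr ((hinv _).mpr hm)
        rw [hc]
        simp only [Bool.not_true, List.all_eq_false]
        obtain ⟨x, hx, he⟩ := List.mem_map.mp hm
        exact ⟨x, hx, by simp [he]⟩
      · have hc : PySem.Set.contains seen (pvKeyB r) = false := by
          by_contra hne
          exact hm ((hinv _).mp ((PySem.Set.contains_iff _ _).mp (by simpa using hne)))
        rw [hc]
        simp only [Bool.not_false, List.all_eq_true]
        intro x hx
        simp only [bne_iff_ne, ne_eq]
        intro he
        exact hm (List.mem_map.mpr ⟨x, hx, he⟩)
    simp only [hcond]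
    have hlist : p ++ r :: rs = (p ++ [r]) ++ rs := by simp
    have hlen : (p.length : Int) + 1 = (((p ++ [r]).length : Int)) := by simp
    by_cases h : PySem.Set.contains seen (pvKeyB r) = true
    · simp only [h, Bool.not_true, Bool.false_eq_true, if_false, pvFirsts, if_true]
      rw [hlist, hlen, ih (p ++ [r]) seen]
      intro k
      simp only [List.map_append, List.mem_append, List.map_cons, List.map_nil,
        List.mem_singleton]
      constructor
      · intro hk; exact Or.inl ((hinv k).mp hk)
      · rintro (hk | hk)
        · exact (hinv k).mpr hk
        · subst hk; exact (PySem.Set.contains_iff _ _).mp h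
    · have h' : PySem.Set.contains seen (pvKeyB r) = false := by simpa using h
      simp only [h', Bool.not_false, if_true, pvFirsts, Bool.false_eq_true, if_false,
        List.map_cons]
      rw [hlist, hlen, ih (p ++ [r]) (PySem.Set.add seen (pvKeyB r))]
      intro k
      rw [PySem.Set.mem_add]
      simp only [List.map_append, List.mem_append, List.map_cons, List.map_nil,
        List.mem_singleton]
      constructor
      · rintro (hk | hk)
        · exact Or.inl ((hinv k).mp hk)
        · exact Or.inr hk
      · rintro (hk | hk)
        · exact Or.inl ((hinv k).mpr hk)
        · exact Or.inr hk

-- ===== VERDICT (by name: the statement is the Claim_ definition above) =====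
theorem dedup_predictions_spec : Claim_equal_dedup_predictions := by
  intro pred_rows _
  unfold Spec_dedup_predictions dedup_predictions dedup_predictions_alt
  have hB := pvB_filter pred_rows [] PySem.Set.empty (by intro k; simp [PySem.Set.empty])
  simp only [List.nil_append, List.length_nil, Nat.cast_zero] at hB
  have hA := pvA_fold pred_rows PySem.Set.empty [] 0
  simp only [hB]
  have hA1 := congrArg Prod.fst hA
  have hA2 := congrArg Prod.snd hA
  simp only [List.nil_append] at hA1 hA2
  rw [Prod.mk.injEq]
  refine ⟨hA1, ?_⟩
  rw [hA2]
  omega
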